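-- pv_equiv track=rewrite | github.com/Rumplestomp/python-1st-year | finer.py | second_to_last
-- ===== SOURCE A (Python) =====
-- def finer(s):
--     '''
--     '''
--     if len(s) <= 2:
--         result = s
--     else:
--         result = s[0] + finer(s[2:]) + s[1]
--     return result
--
-- def second_to_last(s):
--     '''
--     '''
--     ours = s
--     curr = finer(s)
--     nex = finer(curr)
--     while nex != ours:
--         curr = nex
--         nex = finer(curr)
--     return (curr)
-- ===== SOURCE B (Python) =====
-- def second_to_last(s):
--     # The loop in A stops one step before the iteration of `finer` cycles back
--     # to s, i.e. it returns finer^{-1}(s); compute that inverse directly.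
--     if len(s) <= 2:
--         return s
--     return s[0] + s[-1] + second_to_last(s[1:-1])
-- ===== Notes on version B (the rewrite author's own statement) =====
-- stated objective: faster
-- what changed: A repeatedly applies the rearrangement `finer` until it cycles back to s and returns the previous state; B observes that this state is finer^{-1}(s) and computes the inverse directly by one recursion (peel first/last characters), skipping the whole iteration.
import Mathlib
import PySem

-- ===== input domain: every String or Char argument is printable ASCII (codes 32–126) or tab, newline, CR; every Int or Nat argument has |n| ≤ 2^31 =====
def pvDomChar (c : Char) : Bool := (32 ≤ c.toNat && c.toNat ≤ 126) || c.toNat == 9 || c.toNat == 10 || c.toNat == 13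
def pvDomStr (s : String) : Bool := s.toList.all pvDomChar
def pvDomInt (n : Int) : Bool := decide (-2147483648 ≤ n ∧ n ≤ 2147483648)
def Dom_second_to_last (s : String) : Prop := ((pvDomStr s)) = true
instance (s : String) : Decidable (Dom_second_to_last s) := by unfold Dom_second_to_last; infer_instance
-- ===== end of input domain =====

-- B replaces A's "iterate `finer` until it cycles back to s" loop by a direct
-- computation of the inverse rearrangement finer⁻¹(s) (one recursion peeling the
-- first and last characters); a timing run measured B faster.

-- ===== PORT A =====
-- finer(s): if len(s) <= 2: s else s[0] + finer(s[2:]) + s[1], over the char list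
def finerL : List Char → List Char
  | a :: b :: c :: rest => a :: (finerL (c :: rest) ++ [b])
  | l => l
termination_by l => l.length

-- A's while loop: `while nex != ours: curr = nex; nex = finer(curr)`; fuel is only
-- a totality cap (proved sufficient below: the loop always exits via nex = ours).
def stlLoop (ours : List Char) : Nat → List Char → List Char → List Char
  | 0, curr, _ => curr
  | fuel + 1, curr, nex => if nex = ours then curr else stlLoop ours fuel nex (finerL nex)

def second_to_last (s : String) : String :=
  let ours := s.toList
  let curr := finerL ours
  let nex := finerL curr
  String.mk (stlLoop ours (ours.length.factorial + 2) curr nex)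

-- ===== PORT B =====
-- if len(s) <= 2: s else s[0] + s[-1] + second_to_last(s[1:-1]), over the char list
def unfinerL : List Char → List Char
  | a :: b :: c :: rest =>
      a :: (b :: c :: rest).getLastD 'x' :: unfinerL ((b :: c :: rest).dropLast)
  | l => l
termination_by l => l.length
decreasing_by simp

def second_to_last_alt (s : String) : String := String.mk (unfinerL s.toList)

-- ===== PRECONDITION & SPEC =====
def Spec_second_to_last (s : String) (out : String) : Prop := out = second_to_last_alt s
instance (s : String) (out : String) : Decidable (Spec_second_to_last s out) := by unfold Spec_second_to_last; infer_instance

-- ===== CLAIM (what is proved, stated in full; the proofs are below) =====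
def Claim_equal_second_to_last : Prop := ∀ (s : String), Dom_second_to_last s → Spec_second_to_last s (second_to_last s)

-- ===== LEMMAS AND PROOFS =====

theorem length_finerL (l : List Char) : (finerL l).length = l.length := by
  induction l using finerL.induct with
  | case1 a b c rest ih => simp [finerL, ih]
  | case2 l h => simp [finerL]

theorem unfinerL_cons_concat (a : Char) (X : List Char) (b : Char) (h : X ≠ []) :
    unfinerL (a :: (X ++ [b])) = a :: b :: unfinerL X := by
  cases X with
  | nil => exact absurd rfl h
  | cons x xs =>
    cases xs with
    | nil => simp [unfinerL]
    | cons y ys =>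
      have : a :: ((x :: y :: ys) ++ [b]) = a :: x :: y :: (ys ++ [b]) := by simp
      rw [show (x :: y :: ys) ++ [b] = x :: y :: (ys ++ [b]) from by simp]
      rw [unfinerL]
      rw [show x :: y :: (ys ++ [b]) = (x :: y :: ys) ++ [b] from by simp,
          List.getLastD_concat, List.dropLast_concat]

theorem unfiner_finer (l : List Char) : unfinerL (finerL l) = l := by
  induction l using finerL.induct with
  | case1 a b c rest ih =>
    rw [finerL, unfinerL_cons_concat a (finerL (c :: rest)) b, ih]
    intro hnil
    have := length_finerL (c :: rest)
    rw [hnil] at this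
    simp at this
  | case2 l h =>
    rcases l with _ | ⟨a, _ | ⟨b, _ | ⟨c, rest⟩⟩⟩
    · simp [finerL, unfinerL]
    · simp [finerL, unfinerL]
    · simp [finerL, unfinerL]
    · exact absurd rfl (h a b c rest)

theorem finerL_injective : Function.Injective finerL :=
  Function.LeftInverse.injective unfiner_finer

theorem perm_finerL (l : List Char) : (finerL l).Perm l := by
  induction l using finerL.induct with
  | case1 a b c rest ih =>
    rw [finerL]
    exact List.Perm.cons a ((List.perm_append_singleton b _).trans (List.Perm.cons b ih))
  | case2 l h =>
    rcases l with _ | ⟨a, _ | ⟨b, _ | ⟨c, rest⟩⟩⟩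
    · simp [finerL]
    · simp [finerL]
    · simp [finerL]
    · exact absurd rfl (h a b c rest)

theorem iterate_perm (l : List Char) (k : Nat) : (finerL^[k] l).Perm l := by
  induction k with
  | zero => exact List.Perm.refl _
  | succ k ih =>
    rw [Function.iterate_succ_apply']
    exact (perm_finerL _).trans ih

theorem exists_period (l : List Char) :
    ∃ p, 1 ≤ p ∧ p ≤ l.length.factorial ∧ finerL^[p] l = l := by
  classical
  have hmem : ∀ k ∈ Finset.range (l.length.factorial + 1),
      finerL^[k] l ∈ l.permutations.toFinset := by
    intro k _
    exact List.mem_toFinset.mpr (List.mem_permutations.mpr (iterate_perm l k))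
  have hcard : l.permutations.toFinset.card < (Finset.range (l.length.factorial + 1)).card := by
    have h1 : l.permutations.toFinset.card ≤ l.permutations.length := List.toFinset_card_le _
    rw [List.length_permutations] at h1
    simp only [Finset.card_range]
    omega
  obtain ⟨i, hi, j, hj, hne, heq⟩ :=
    Finset.exists_ne_map_eq_of_card_lt_of_maps_to hcard hmem
  simp only [Finset.mem_range] at hi hj
  rcases Nat.lt_or_ge i j with hlt | hge
  · refine ⟨j - i, by omega, by omega, ?_⟩
    have hadd : finerL^[i] (finerL^[j - i] l) = finerL^[i] l := by
      rw [← Function.iterate_add_apply]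
      rw [show i + (j - i) = j from by omega]
      exact heq.symm
    exact (finerL_injective.iterate i) hadd
  · have hlt : j < i := by omega
    refine ⟨i - j, by omega, by omega, ?_⟩
    have hadd : finerL^[j] (finerL^[i - j] l) = finerL^[j] l := by
      rw [← Function.iterate_add_apply]
      rw [show j + (i - j) = i from by omega]
      exact heq
    exact (finerL_injective.iterate j) hadd

theorem iterate_two (x : List Char) : finerL^[2] x = finerL (finerL x) := by
  rw [show (2 : Nat) = 1 + 1 from rfl, Function.iterate_add_apply]
  simp

theorem stlLoop_eq (ours : List Char) (fuel : Nat) (curr nex : List Char)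
    (hn : nex = finerL curr) (hex : ∃ m, m ≤ fuel ∧ finerL^[m] nex = ours) :
    stlLoop ours fuel curr nex = unfinerL ours := by
  induction fuel generalizing curr nex with
  | zero =>
    obtain ⟨m, hm, hit⟩ := hex
    have hm0 : m = 0 := by omega
    subst hm0
    simp only [Function.iterate_zero, id_eq] at hit
    rw [stlLoop, ← hit, hn, unfiner_finer]
  | succ fuel ih =>
    by_cases hc : nex = ours
    · rw [stlLoop, if_pos hc, ← hc, hn, unfiner_finer]
    · rw [stlLoop, if_neg hc]
      obtain ⟨m, hm, hit⟩ := hex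
      have hm0 : m ≠ 0 := by
        intro h; subst h
        simp only [Function.iterate_zero, id_eq] at hit
        exact hc hit
      obtain ⟨m', rfl⟩ := Nat.exists_eq_succ_of_ne_zero hm0
      refine ih nex (finerL nex) rfl ⟨m', by omega, ?_⟩
      rw [← Function.iterate_succ_apply]
      exact hit

-- ===== VERDICT (by name: the statement is the Claim_ definition above) =====
theorem second_to_last_spec : Claim_equal_second_to_last := by
  intro s _
  unfold Spec_second_to_last second_to_last second_to_last_alt
  simp only []
  congr 1
  obtain ⟨p, hp1, hpf, hpit⟩ := exists_period s.toList
  apply stlLoop_eq _ _ _ _ rfl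
  rcases Nat.lt_or_ge p 2 with hp2 | hp2
  · -- p = 1: finerL ours = ours, so finerL (finerL ours) = ours already
    have hp : p = 1 := by omega
    subst hp
    simp only [Function.iterate_one] at hpit
    exact ⟨0, by omega, by simp [hpit]⟩
  · refine ⟨p - 2, by omega, ?_⟩
    rw [← iterate_two, ← Function.iterate_add_apply,
        show p - 2 + 2 = p from by omega]
    exact hpit
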